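-- pv_equiv track=rewrite | github.com/TETH-Main/MarhGraphArtDiscord-bot | gas_client.py | format_tags_for_display
-- ===== SOURCE A (Python) =====
-- from typing import List, Dict, Optional
--
-- def format_tags_for_display(tags_data: List[Dict], max_per_line: int = 6) -> str:
--     """
--     タグリストを表示用にフォーマット
--
--     Args:
--         tags_data: タグデータのリスト
--         max_per_line: 1行あたりの最大タグ数
--
--     Returns:
--         str: フォーマットされたタグリスト文字列
--     """
--     if not tags_data:
--         return "利用可能なタグがありません。"
--
--     lines = []
--     current_line = []
--
--     for i, tag in enumerate(tags_data, 1):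
--         tag_name = tag.get('tagName', f"Tag{i}")
--         tag_display = f"`{i}. {tag_name}`"
--         current_line.append(tag_display)
--
--         if len(current_line) >= max_per_line:
--             lines.append(' '.join(current_line))
--             current_line = []
--
--     # 残りのタグがあれば追加
--     if current_line:
--         lines.append(' '.join(current_line))
--
--     return '\n'.join(lines)
-- ===== SOURCE B (Python) =====
-- def format_tags_for_display(tags_data, max_per_line=6):
--     if not tags_data:
--         return "利用可能なタグがありません。"
--     displays = [f"`{i}. {tag.get('tagName', f'Tag{i}')}`"
--                 for i, tag in enumerate(tags_data, 1)]
--     step = max(1, max_per_line)  # A puts one tag per line when max_per_line <= 0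
--     return '\n'.join(' '.join(displays[i:i + step])
--                      for i in range(0, len(displays), step))
-- ===== Notes on version B (the rewrite author's own statement) =====
-- stated objective: simpler
-- what changed: Replaces the incremental accumulate-and-flush loop with a two-phase build-then-chunk: first build all numbered display strings, then slice them into chunks of size max(1, max_per_line) and join.
import Mathlib
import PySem

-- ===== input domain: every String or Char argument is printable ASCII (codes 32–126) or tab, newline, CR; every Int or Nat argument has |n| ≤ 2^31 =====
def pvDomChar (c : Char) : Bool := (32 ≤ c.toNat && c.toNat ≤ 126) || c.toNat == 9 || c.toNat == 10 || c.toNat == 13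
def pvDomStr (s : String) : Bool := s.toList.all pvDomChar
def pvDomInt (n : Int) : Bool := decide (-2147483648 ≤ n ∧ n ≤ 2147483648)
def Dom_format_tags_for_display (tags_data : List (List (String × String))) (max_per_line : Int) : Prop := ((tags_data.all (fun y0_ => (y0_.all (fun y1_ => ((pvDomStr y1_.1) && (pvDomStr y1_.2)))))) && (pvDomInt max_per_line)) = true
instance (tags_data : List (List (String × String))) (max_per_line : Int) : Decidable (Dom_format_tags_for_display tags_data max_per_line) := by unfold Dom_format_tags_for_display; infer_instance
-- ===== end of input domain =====

-- B replaces A's accumulate-and-flush loop with build-all-displays then chunk-by-slicing (simpler decomposition, same cost).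

-- ===== PORT A =====
-- the f-string `{i}. {tag.get('tagName', f"Tag{i}")}` (shared by both Pythons verbatim)
def pvDisp (i : Int) (tag : List (String × String)) : String :=
  "`" ++ PySem.Int.toStr i ++ ". " ++ PySem.Dict.getD (PySem.Dict.mk tag) "tagName" ("Tag" ++ PySem.Int.toStr i) ++ "`"

-- A's for-loop over enumerate(tags_data, 1), state = (lines, current_line)
def pvALoop (m : Int) : List (List (String × String)) → Int → List String × List String → List String × List String
  | [], _, st => st
  | tag :: rest, i, (lines, cur) =>
      let cur' := cur ++ [pvDisp i tag]
      if m ≤ (cur'.length : Int) then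
        pvALoop m rest (i + 1) (lines ++ [PySem.Str.join " " cur'], [])
      else
        pvALoop m rest (i + 1) (lines, cur')

def format_tags_for_display (tags_data : List (List (String × String))) (max_per_line : Int) : String :=
  if tags_data = [] then "利用可能なタグがありません。"
  else
    let st := pvALoop max_per_line tags_data 1 ([], [])
    let lines := if st.2 = [] then st.1 else st.1 ++ [PySem.Str.join " " st.2]
    PySem.Str.join "\n" lines

-- ===== PORT B =====
-- the comprehension [f"`{i}. {...}`" for i, tag in enumerate(tags_data, 1)]
def pvDisplays : Int → List (List (String × String)) → List String
  | _, [] => []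
  | i, tag :: rest => pvDisp i tag :: pvDisplays (i + 1) rest

-- Source B's chunking loop: displays[i:i+step] for i in range(0, len, step); with step ≥ 1
-- (guaranteed by max(1, ...)) each slice with nonnegative bounds is exactly take/drop.
def pvChunks (k : Nat) : List String → List (List String)
  | [] => []
  | x :: xs => (x :: xs.take (k - 1)) :: pvChunks k (xs.drop (k - 1))
  termination_by xs => xs.length
  decreasing_by simp

def format_tags_for_display_alt (tags_data : List (List (String × String))) (max_per_line : Int) : String :=
  if tags_data = [] then "利用可能なタグがありません。"
  else
    let step : Nat := (max 1 max_per_line).toNat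
    PySem.Str.join "\n" ((pvChunks step (pvDisplays 1 tags_data)).map (PySem.Str.join " "))

-- ===== PRECONDITION & SPEC =====
def Spec_format_tags_for_display (tags_data : List (List (String × String))) (max_per_line : Int) (out : String) : Prop := out = format_tags_for_display_alt tags_data max_per_line
instance (tags_data : List (List (String × String))) (max_per_line : Int) (out : String) : Decidable (Spec_format_tags_for_display tags_data max_per_line out) := by unfold Spec_format_tags_for_display; infer_instance

-- ===== CLAIM (what is proved, stated in full; the proofs are below) =====
def Claim_equal_format_tags_for_display : Prop := ∀ (tags_data : List (List (String × String))) (max_per_line : Int), Dom_format_tags_for_display tags_data max_per_line → Spec_format_tags_for_display tags_data max_per_line (format_tags_for_display tags_data max_per_line)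

-- ===== LEMMAS AND PROOFS =====

-- A's loop on the display strings only: flush when k elements are gathered
def pvChunkAux (k : Nat) : List String → List String → List (List String)
  | cur, [] => if cur = [] then [] else [cur]
  | cur, x :: xs =>
      if k ≤ cur.length + 1 then (cur ++ [x]) :: pvChunkAux k [] xs
      else pvChunkAux k (cur ++ [x]) xs

theorem pv_branch_iff (m : Int) (n : Nat) (hn : 1 ≤ n) :
    (m ≤ (n : Int)) ↔ ((max 1 m).toNat ≤ n) := by
  rcases le_total m 1 with h | h
  · rw [max_eq_left h]; omega
  · rw [max_eq_right h]; omega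

theorem pvALoop_eq_chunkAux (m : Int) (ts : List (List (String × String)))
    (i : Int) (lines cur : List String) :
    (let st := pvALoop m ts i (lines, cur);
     if st.2 = [] then st.1 else st.1 ++ [PySem.Str.join " " st.2])
    = lines ++ (pvChunkAux ((max 1 m).toNat) cur (pvDisplays i ts)).map (PySem.Str.join " ") := by
  induction ts generalizing i lines cur with
  | nil =>
      simp only [pvALoop, pvDisplays, pvChunkAux]
      by_cases hc : cur = []
      · simp [hc]
      · simp [hc]
  | cons t rest ih =>
      simp only [pvALoop, pvDisplays, pvChunkAux]
      have hiff := pv_branch_iff m (cur ++ [pvDisp i t]).length (by simp)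
      by_cases h : m ≤ ((cur ++ [pvDisp i t]).length : Int)
      · have h' : (max 1 m).toNat ≤ cur.length + 1 := by
          have := hiff.mp h; simpa using this
        simp only [if_pos h, if_pos h']
        rw [ih]
        simp
      · have h' : ¬ (max 1 m).toNat ≤ cur.length + 1 := by
          intro hc; exact h (hiff.mpr (by simpa using hc))
        simp only [if_neg h, if_neg h']
        rw [ih]

theorem pvChunkAux_step (k : Nat) (_hk : 1 ≤ k) :
    ∀ (xs cur : List String), cur.length < k →
    pvChunkAux k cur xs =
      if cur = [] ∧ xs = [] then []
      else (cur ++ xs.take (k - cur.length)) :: pvChunkAux k [] (xs.drop (k - cur.length)) := by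
  intro xs
  induction xs with
  | nil =>
      intro cur _
      simp only [pvChunkAux]
      rcases eq_or_ne cur [] with h | h <;> simp [h, pvChunkAux]
  | cons x xs ih =>
      intro cur hcur
      simp only [pvChunkAux]
      by_cases h : k ≤ cur.length + 1
      · have hke : k = cur.length + 1 := by omega
        have h1 : k - cur.length = 1 := by omega
        simp [h, h1]
      · have hlt : cur.length + 1 < k := by omega
        rw [if_neg h, ih (cur ++ [x]) (by simp; omega)]
        have h2 : k - cur.length = (k - (cur ++ [x]).length) + 1 := by simp; omega
        rw [h2]
        simp [List.take_succ_cons, List.drop_succ_cons]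

theorem pvChunkAux_nil_eq (k : Nat) (hk : 1 ≤ k) :
    ∀ (n : Nat) (xs : List String), xs.length ≤ n → pvChunkAux k [] xs = pvChunks k xs := by
  intro n
  induction n with
  | zero =>
      intro xs hxs
      have : xs = [] := List.eq_nil_of_length_eq_zero (by omega)
      subst this; simp [pvChunkAux, pvChunks]
  | succ n ih =>
      intro xs hxs
      cases xs with
      | nil => simp [pvChunkAux, pvChunks]
      | cons x xs =>
          rw [pvChunkAux_step k hk (x :: xs) [] (by simp; omega)]
          -- take k (x::xs) = x :: take (k-1) xs, drop k (x::xs) = drop (k-1) xs  (k ≥ 1)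
          have hk1 : k = (k - 1) + 1 := by omega
          conv_rhs => rw [pvChunks]
          simp only [List.length_nil, Nat.sub_zero, List.nil_append]
          rw [if_neg (by simp)]
          conv_lhs => rw [hk1, List.take_succ_cons, List.drop_succ_cons]
          rw [← hk1, ih (xs.drop (k - 1)) (by simp at hxs ⊢; omega)]

-- ===== VERDICT (by name: the statement is the Claim_ definition above) =====
theorem format_tags_for_display_spec : Claim_equal_format_tags_for_display := by
  intro tags m _
  unfold Spec_format_tags_for_display format_tags_for_display format_tags_for_display_alt
  rcases eq_or_ne tags [] with h | h
  · simp [h]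
  · rw [if_neg h, if_neg h]
    have hk : 1 ≤ (max 1 m).toNat := by
      rcases le_total m 1 with hm | hm
      · rw [max_eq_left hm]; omega
      · rw [max_eq_right hm]; omega
    have := pvALoop_eq_chunkAux m tags 1 [] []
    simp only [List.nil_append] at this
    show PySem.Str.join "\n" (if (pvALoop m tags 1 ([], [])).2 = [] then (pvALoop m tags 1 ([], [])).1 else (pvALoop m tags 1 ([], [])).1 ++ [PySem.Str.join " " (pvALoop m tags 1 ([], [])).2]) = PySem.Str.join "\n" ((pvChunks ((max 1 m).toNat) (pvDisplays 1 tags)).map (PySem.Str.join " "))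
    rw [this, pvChunkAux_nil_eq ((max 1 m).toNat) hk (pvDisplays 1 tags).length _ (le_refl _)]
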